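-- pv_equiv track=rewrite | github.com/AlexanderPershin/txt_column_to_json_parser | main.py | get_tuples
-- ===== SOURCE A (Python) =====
-- def get_tuples(my_list):
--     res_list = []
--     vars_list = []
--     vals_list = []
--     for idx in range(0, len(my_list)):
--         if(idx % 2):
--             vars_list.append(my_list[idx])
--         else:
--             vals_list.append(my_list[idx])
--
--     res_list = list(zip(vals_list, vars_list))
--     return res_list
-- ===== SOURCE B (Python) =====
-- def get_tuples(my_list):
--     # single stepped pass: pair consecutive elements directly; the step-2 index
--     # naturally drops a trailing unpaired element (matching zip's truncation)
--     return [(my_list[i], my_list[i + 1]) for i in range(0, len(my_list) - 1, 2)]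
-- ===== Notes on version B (the rewrite author's own statement) =====
-- stated objective: simpler
-- what changed: Replaces the three-list partition (evens into vals, odds into vars) followed by zip with a single stepped pass over range(0, len-1, 2) that emits each consecutive pair directly.
import Mathlib
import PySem

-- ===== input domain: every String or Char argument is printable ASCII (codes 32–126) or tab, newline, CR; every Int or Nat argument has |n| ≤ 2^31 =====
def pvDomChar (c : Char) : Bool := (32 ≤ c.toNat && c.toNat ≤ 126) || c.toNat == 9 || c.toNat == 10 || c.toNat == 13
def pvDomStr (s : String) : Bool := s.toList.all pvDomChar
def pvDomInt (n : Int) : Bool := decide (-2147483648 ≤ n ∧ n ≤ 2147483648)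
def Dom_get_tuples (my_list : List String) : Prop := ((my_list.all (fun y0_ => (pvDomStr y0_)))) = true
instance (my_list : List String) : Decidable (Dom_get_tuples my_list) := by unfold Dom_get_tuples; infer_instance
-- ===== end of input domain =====

-- B replaces A's partition-into-two-lists-then-zip with a single stepped pass
-- that pairs consecutive elements directly (simpler decomposition, same cost).

-- ===== PORT A =====
-- partition indices by parity into (vars_list, vals_list), then zip vals with vars
def get_tuples (my_list : List String) : List (String × String) :=
  let st := (PySem.List.pyRange 0 (my_list.length : Int) 1).foldl
    (fun (st : List String × List String) idx =>
      if PySem.Int.mod idx 2 ≠ 0 then (st.1 ++ [PySem.List.pyGetD my_list idx ""], st.2)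
      else (st.1, st.2 ++ [PySem.List.pyGetD my_list idx ""]))
    ([], [])
  st.2.zip st.1

-- ===== PORT B =====
-- the stepped loop `for i in range(0, len-1, 2): (xs[i], xs[i+1])` as the obvious
-- two-at-a-time structural recursion
def get_tuples_alt : List String → List (String × String)
  | [] => []
  | [_] => []
  | a :: b :: rest => (a, b) :: get_tuples_alt rest

-- ===== PRECONDITION & SPEC =====
def Spec_get_tuples (my_list : List String) (out : List (String × String)) : Prop := out = get_tuples_alt my_list
instance (my_list : List String) (out : List (String × String)) : Decidable (Spec_get_tuples my_list out) := by unfold Spec_get_tuples; infer_instance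

-- ===== CLAIM (what is proved, stated in full; the proofs are below) =====
def Claim_equal_get_tuples : Prop := ∀ (my_list : List String), Dom_get_tuples my_list → Spec_get_tuples my_list (get_tuples my_list)

-- ===== LEMMAS AND PROOFS =====

-- (vars, vals) selected from xs where element j has absolute parity p + j
def pvSel (p : Nat) : List String → List String × List String
  | [] => ([], [])
  | a :: t =>
    let r := pvSel (p + 1) t
    if p % 2 ≠ 0 then (a :: r.1, r.2) else (r.1, a :: r.2)

theorem pvSel_add_two (p : Nat) (xs : List String) : pvSel (p + 2) xs = pvSel p xs := by
  induction xs generalizing p with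
  | nil => rfl
  | cons a t ih =>
    simp only [pvSel]
    rw [show p + 2 + 1 = (p + 1) + 2 from by omega, ih (p + 1),
        show (p + 2) % 2 = p % 2 from by omega]

theorem pvFoldA (xs : List String) (p : Nat) (v w : List String) :
    (List.range xs.length).foldl
      (fun (st : List String × List String) k =>
        if (p + k) % 2 ≠ 0 then (st.1 ++ [xs.getD k ""], st.2)
        else (st.1, st.2 ++ [xs.getD k ""])) (v, w)
    = (v ++ (pvSel p xs).1, w ++ (pvSel p xs).2) := by
  induction xs generalizing p v w with
  | nil => simp [pvSel]
  | cons a t ih =>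
    simp only [List.length_cons, List.range_succ_eq_map, List.foldl_cons, List.foldl_map]
    have hfun : (fun (st : List String × List String) k =>
        if (p + (k + 1)) % 2 ≠ 0 then (st.1 ++ [(a :: t).getD (k + 1) ""], st.2)
        else (st.1, st.2 ++ [(a :: t).getD (k + 1) ""]))
        = (fun (st : List String × List String) k =>
        if ((p + 1) + k) % 2 ≠ 0 then (st.1 ++ [t.getD k ""], st.2)
        else (st.1, st.2 ++ [t.getD k ""])) := by
      funext st k
      rw [show p + (k + 1) = (p + 1) + k from by omega]
      rfl
    simp only [Nat.succ_eq_add_one, hfun]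
    by_cases hp : p % 2 ≠ 0
    · simp only [Nat.add_zero, List.getD_cons_zero, ih, pvSel]
      simp [hp]
    · simp only [Nat.add_zero, List.getD_cons_zero, ih, pvSel]
      simp [hp]

theorem pvZip_sel (xs : List String) :
    ((pvSel 0 xs).2).zip ((pvSel 0 xs).1) = get_tuples_alt xs := by
  induction xs using get_tuples_alt.induct with
  | case1 => rfl
  | case2 => rfl
  | case3 a b rest ih =>
    simp only [pvSel, get_tuples_alt]
    rw [show (0:Nat) + 1 + 1 = 0 + 2 from rfl, pvSel_add_two]
    simpa using ih

theorem get_tuples_eq (xs : List String) : get_tuples xs = get_tuples_alt xs := by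
  unfold get_tuples
  rw [PySem.List.pyRange_one]
  have hlen : ((xs.length : Int) - 0).toNat = xs.length := by omega
  rw [hlen, List.foldl_map]
  have hfun : (fun (st : List String × List String) (k : Nat) =>
      if PySem.Int.mod (0 + (k : Int)) 2 ≠ 0 then
        (st.1 ++ [PySem.List.pyGetD xs (0 + (k : Int)) ""], st.2)
      else (st.1, st.2 ++ [PySem.List.pyGetD xs (0 + (k : Int)) ""]))
      = (fun (st : List String × List String) (k : Nat) =>
      if (0 + k) % 2 ≠ 0 then (st.1 ++ [xs.getD k ""], st.2)
      else (st.1, st.2 ++ [xs.getD k ""])) := by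
    funext st k
    have h1 : (0 : Int) + (k : Int) = ((k : Nat) : Int) := by omega
    rw [h1, PySem.List.pyGetD_natCast, show (2:Int) = ((2:Nat):Int) from rfl,
        PySem.Int.mod_natCast]
    norm_cast
    rw [Nat.zero_add]
  rw [hfun, pvFoldA]
  simpa using pvZip_sel xs

-- ===== VERDICT (by name: the statement is the Claim_ definition above) =====
theorem get_tuples_spec : Claim_equal_get_tuples := by
  intro xs _
  exact get_tuples_eq xs
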